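-- pv_equiv track=rewrite | github.com/sherkevin/okke | server_snapshot/remote_autodl_20260326/server_snapshot/A-OSP_Project/code/eval/run_dual_gain_mmmu.py | extract_letter
-- ===== SOURCE A (Python) =====
-- def extract_letter(text: str, valid: list) -> str:
--     """Return the first letter from valid that appears in the text (case-insensitive)."""
--     text_upper = text.upper()
--     for letter in valid:
--         if f"({letter})" in text_upper or f" {letter} " in text_upper or \
--            text_upper.strip().startswith(letter):
--             return letter
--     # fallback: find any valid letter mention
--     for letter in valid:
--         if letter in text_upper:
--             return letter
--     return valid[0]   # conservative default: A
-- ===== SOURCE B (Python) =====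
-- def extract_letter(text: str, valid: list) -> str:
--     """Rank every letter (0 = strong pattern, 1 = plain mention, 2 = absent) and
--     select the first letter of minimal rank with min(..., key=...)."""
--     text_upper = text.upper()
--     stripped = text_upper.strip()
--
--     def tier(letter):
--         if f"({letter})" in text_upper or f" {letter} " in text_upper \
--            or stripped.startswith(letter):
--             return 0
--         return 1 if letter in text_upper else 2
--
--     return min(valid, key=tier)
-- ===== Notes on version B (the rewrite author's own statement) =====
-- stated objective: idiomatic
-- what changed: Replaces A's two sequential early-return scans over valid with rank-and-select: every letter is mapped to a tier (0 strong pattern, 1 plain mention, 2 absent) and min(valid, key=tier) picks the first letter of minimal tier.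
import Mathlib
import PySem

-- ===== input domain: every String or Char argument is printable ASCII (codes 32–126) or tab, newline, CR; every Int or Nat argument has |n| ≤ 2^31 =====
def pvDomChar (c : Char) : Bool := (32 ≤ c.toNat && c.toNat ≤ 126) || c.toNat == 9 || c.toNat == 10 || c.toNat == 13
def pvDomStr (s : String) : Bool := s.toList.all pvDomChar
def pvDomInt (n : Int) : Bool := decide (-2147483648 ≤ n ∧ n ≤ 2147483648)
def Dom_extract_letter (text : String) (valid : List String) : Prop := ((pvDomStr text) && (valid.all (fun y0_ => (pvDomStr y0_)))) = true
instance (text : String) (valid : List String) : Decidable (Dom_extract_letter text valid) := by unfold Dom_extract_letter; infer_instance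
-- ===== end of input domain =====

-- B replaces A's two sequential early-return scans by rank-and-select: each letter is
-- mapped to a tier (0 strong, 1 mention, 2 absent) and min(valid, key=tier) picks the
-- first letter of minimal tier; objective: idiomatic, same cost.
-- Pre_ excludes valid = [], on which Python A raises IndexError (B raises ValueError).


-- ===== PORT A =====
-- 'f"({letter})" in text_upper or f" {letter} " in text_upper or text_upper.strip().startswith(letter)'
def pvStrongA (tu : List Char) (L : String) : Bool :=
  PySem.Chars.isIn ('(' :: L.toList ++ [')']) tu ||
  PySem.Chars.isIn (' ' :: L.toList ++ [' ']) tu ||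
  PySem.Chars.startswith (PySem.Chars.strip tu) L.toList

-- first for-loop of A (early return → Option)
def pvLoopA1 (tu : List Char) : List String → Option String
  | [] => none
  | L :: rest => if pvStrongA tu L then some L else pvLoopA1 tu rest

-- second for-loop of A: 'if letter in text_upper'
def pvLoopA2 (tu : List Char) : List String → Option String
  | [] => none
  | L :: rest => if PySem.Chars.isIn L.toList tu then some L else pvLoopA2 tu rest

def extract_letter (text : String) (valid : List String) : String :=
  let tu := PySem.Chars.upper text.toList
  match pvLoopA1 tu valid with
  | some L => L
  | none =>
    match pvLoopA2 tu valid with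
    | some L => L
    | none => (PySem.List.pyGet? valid 0).getD ""   -- valid[0]; IndexError (valid = []) excluded by Pre_

-- ===== PORT B =====
-- tier(letter): 0 = strong pattern, 1 = plain mention, 2 = absent
def pvTierB (tu st : List Char) (L : String) : Int :=
  if PySem.Chars.isIn ('(' :: L.toList ++ [')']) tu ||
     PySem.Chars.isIn (' ' :: L.toList ++ [' ']) tu ||
     PySem.Chars.startswith st L.toList then 0
  else if PySem.Chars.isIn L.toList tu then 1 else 2

-- 'return min(valid, key=tier)' — ValueError on valid = [] excluded by Pre_
def extract_letter_alt (text : String) (valid : List String) : String :=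
  let tu := PySem.Chars.upper text.toList
  let st := PySem.Chars.strip tu
  (PySem.List.min? valid (pvTierB tu st)).getD ""

-- ===== PRECONDITION & SPEC =====
-- Pre_ excludes exactly valid = [], where Python A raises IndexError (and B ValueError).
def Pre_extract_letter (text : String) (valid : List String) : Prop := valid ≠ []
instance (text : String) (valid : List String) : Decidable (Pre_extract_letter text valid) := by unfold Pre_extract_letter; infer_instance
def pvWitness_extract_letter : String × List String := ("The answer is (B).", ["A", "B", "C"])

def Spec_extract_letter (text : String) (valid : List String) (out : String) : Prop := out = extract_letter_alt text valid
instance (text : String) (valid : List String) (out : String) : Decidable (Spec_extract_letter text valid out) := by unfold Spec_extract_letter; infer_instance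

-- ===== CLAIM (what is proved, stated in full; the proofs are below) =====
def Claim_equal_extract_letter : Prop := ∀ (text : String) (valid : List String), Dom_extract_letter text valid → Pre_extract_letter text valid → Spec_extract_letter text valid (extract_letter text valid)

-- ===== LEMMAS AND PROOFS =====

-- the fold step of PySem.List.min? with key pvTierB
def pvStep (tu st : List Char) (acc : Option String) (x : String) : Option String :=
  match acc with
  | none => some x
  | some m => if pvTierB tu st x < pvTierB tu st m then some x else some m

lemma tier_nonneg (tu st : List Char) (L : String) : 0 ≤ pvTierB tu st L := by
  unfold pvTierB; split_ifs <;> norm_num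

lemma tier_eq_zero_iff (tu : List Char) (L : String) :
    pvTierB tu (PySem.Chars.strip tu) L = 0 ↔ pvStrongA tu L = true := by
  unfold pvTierB pvStrongA; split_ifs <;> simp_all

-- A's first tier-1 letter (no strong, but mentioned)
def pvFirst1 (tu st : List Char) : List String → Option String
  | [] => none
  | L :: rest => if pvTierB tu st L = 1 then some L else pvFirst1 tu st rest

-- if no letter is strong, the first tier-1 letter is A's second-loop result
lemma first1_eq_loopA2 (tu : List Char) (l : List String)
    (h : pvLoopA1 tu l = none) :
    pvFirst1 tu (PySem.Chars.strip tu) l = pvLoopA2 tu l := by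
  induction l with
  | nil => rfl
  | cons L rest ih =>
    unfold pvLoopA1 at h
    by_cases hs : pvStrongA tu L = true
    · rw [if_pos hs] at h; exact absurd h (by simp)
    · rw [if_neg hs] at h
      unfold pvStrongA at hs
      rw [Bool.not_eq_true] at hs
      unfold pvFirst1 pvLoopA2 pvTierB
      rw [hs]
      simp only [Bool.false_eq_true, if_false]
      by_cases hi : PySem.Chars.isIn L.toList tu = true
      · rw [hi]; simp
      · rw [Bool.not_eq_true] at hi
        rw [hi]
        simp only [Bool.false_eq_true, if_false, if_neg (by norm_num : ¬ (2:Int) = 1)]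
        exact ih h

-- folding from a tier-0 accumulator keeps it
lemma fold_from0 (tu st : List Char) (l : List String) (m : String)
    (hm : pvTierB tu st m = 0) :
    l.foldl (pvStep tu st) (some m) = some m := by
  induction l with
  | nil => rfl
  | cons L rest ih =>
    have : ¬ pvTierB tu st L < pvTierB tu st m := by
      rw [hm]; exact not_lt.mpr (tier_nonneg tu st L)
    simp only [List.foldl_cons, pvStep, if_neg this]
    exact ih

-- folding from a tier-1 accumulator: first strong letter wins, else keep it
lemma fold_from1 (tu : List Char) (l : List String) (m : String)
    (hm : pvTierB tu (PySem.Chars.strip tu) m = 1) :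
    l.foldl (pvStep tu (PySem.Chars.strip tu)) (some m) =
      match pvLoopA1 tu l with
      | some x => some x
      | none => some m := by
  induction l with
  | nil => rfl
  | cons L rest ih =>
    unfold pvLoopA1
    by_cases hs : pvStrongA tu L
    · have h0 : pvTierB tu (PySem.Chars.strip tu) L = 0 := (tier_eq_zero_iff tu L).mpr hs
      simp only [List.foldl_cons, pvStep, h0, hm, hs, show (0:Int) < 1 by norm_num,
        if_pos]
      exact fold_from0 tu _ rest L h0
    · have h0 : pvTierB tu (PySem.Chars.strip tu) L ≠ 0 := fun h =>
        hs ((tier_eq_zero_iff tu L).mp h)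
      have : ¬ pvTierB tu (PySem.Chars.strip tu) L < pvTierB tu (PySem.Chars.strip tu) m := by
        rw [hm]; have := tier_nonneg tu (PySem.Chars.strip tu) L; omega
      simp only [List.foldl_cons, pvStep, if_neg this, hs, Bool.false_eq_true, if_false]
      exact ih

-- folding from a tier-2 accumulator: first strong, else first mention, else keep it
lemma fold_from2 (tu : List Char) (l : List String) (m : String)
    (hm : pvTierB tu (PySem.Chars.strip tu) m = 2) :
    l.foldl (pvStep tu (PySem.Chars.strip tu)) (some m) =
      match pvLoopA1 tu l with
      | some x => some x
      | none =>
        match pvFirst1 tu (PySem.Chars.strip tu) l with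
        | some x => some x
        | none => some m := by
  induction l with
  | nil => rfl
  | cons L rest ih =>
    unfold pvLoopA1 pvFirst1
    by_cases hs : pvStrongA tu L
    · have h0 : pvTierB tu (PySem.Chars.strip tu) L = 0 := (tier_eq_zero_iff tu L).mpr hs
      simp only [List.foldl_cons, pvStep, h0, hm, hs, show (0:Int) < 2 by norm_num,
        if_pos]
      exact fold_from0 tu _ rest L h0
    · have h0 : pvTierB tu (PySem.Chars.strip tu) L ≠ 0 := fun h =>
        hs ((tier_eq_zero_iff tu L).mp h)
      by_cases h1 : pvTierB tu (PySem.Chars.strip tu) L = 1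
      · simp only [List.foldl_cons, pvStep, h1, hm, hs, Bool.false_eq_true, if_false,
          show (1:Int) < 2 by norm_num, if_pos]
        rw [fold_from1 tu rest L h1]
      · have h2 : pvTierB tu (PySem.Chars.strip tu) L = 2 := by
          have := tier_nonneg tu (PySem.Chars.strip tu) L
          unfold pvTierB at *; split_ifs at * <;> omega
        have : ¬ pvTierB tu (PySem.Chars.strip tu) L < pvTierB tu (PySem.Chars.strip tu) m := by
          rw [hm, h2]; omega
        simp only [List.foldl_cons, pvStep, if_neg this, hs, Bool.false_eq_true, if_false, h1,
          if_false]
        exact ih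

-- the whole equivalence, with the uppercased text generalized
lemma pvCore (tu : List Char) (valid : List String) (hne : valid ≠ []) :
    (match pvLoopA1 tu valid with
     | some L => L
     | none =>
       match pvLoopA2 tu valid with
       | some L => L
       | none => (PySem.List.pyGet? valid 0).getD "") =
      (PySem.List.min? valid (pvTierB tu (PySem.Chars.strip tu))).getD "" := by
  cases valid with
  | nil => exact absurd rfl hne
  | cons L rest =>
    have hmin : PySem.List.min? (L :: rest) (pvTierB tu (PySem.Chars.strip tu)) =
        rest.foldl (pvStep tu (PySem.Chars.strip tu)) (some L) := by
      unfold pvStep PySem.List.min?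
      rw [List.foldl_cons]
      norm_num
      congr 1
      funext acc x
      cases acc <;> rfl
    rw [hmin]
    by_cases hs : pvStrongA tu L = true
    · have h0 : pvTierB tu (PySem.Chars.strip tu) L = 0 := (tier_eq_zero_iff tu L).mpr hs
      rw [fold_from0 tu _ rest L h0,
        show pvLoopA1 tu (L :: rest) = if pvStrongA tu L then some L else pvLoopA1 tu rest
          from rfl, if_pos hs]
      rfl
    · have h0 : pvTierB tu (PySem.Chars.strip tu) L ≠ 0 := fun h =>
        hs ((tier_eq_zero_iff tu L).mp h)
      rw [show pvLoopA1 tu (L :: rest) = if pvStrongA tu L then some L else pvLoopA1 tu rest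
          from rfl, if_neg hs]
      by_cases h1 : pvTierB tu (PySem.Chars.strip tu) L = 1
      · rw [fold_from1 tu rest L h1]
        have hi : PySem.Chars.isIn L.toList tu = true := by
          unfold pvTierB at h1; split_ifs at h1 with hA hB
          · omega
          · exact hB
          · omega
        cases hA : pvLoopA1 tu rest with
        | some x => simp
        | none =>
          rw [show pvLoopA2 tu (L :: rest) =
              if PySem.Chars.isIn L.toList tu then some L else pvLoopA2 tu rest from rfl,
            if_pos hi]
          rfl
      · have h2 : pvTierB tu (PySem.Chars.strip tu) L = 2 := by
          have := tier_nonneg tu (PySem.Chars.strip tu) L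
          unfold pvTierB at *; split_ifs at * <;> omega
        rw [fold_from2 tu rest L h2]
        have hi : ¬ PySem.Chars.isIn L.toList tu = true := by
          unfold pvTierB at h2; split_ifs at h2 with hA hB
          · omega
          · omega
          · exact hB
        cases hA : pvLoopA1 tu rest with
        | some x => simp
        | none =>
          rw [first1_eq_loopA2 tu rest hA,
            show pvLoopA2 tu (L :: rest) =
              if PySem.Chars.isIn L.toList tu then some L else pvLoopA2 tu rest from rfl,
            if_neg hi]
          cases hB : pvLoopA2 tu rest with
          | some x => simp
          | none => simp [PySem.List.pyGet?, PySem.List.pyIdx?]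

-- ===== VERDICT (by name: the statement is the Claim_ definition above) =====
theorem extract_letter_spec : Claim_equal_extract_letter := by
  intro text valid _ hpre
  exact pvCore (PySem.Chars.upper text.toList) valid hpre
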